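-- pv_equiv track=rewrite | github.com/Pahul0516/Facultate | Anul2/Semestrul_2/Ai/Laboratoare/lab01/Lab1/Problema11_AI.py | f
-- ===== SOURCE A (Python) =====
-- from collections import deque
--
-- def f(matrice, n, m):
--     if not matrice:
--         return []
--
--     n, m = len(matrice), len(matrice[0])
--     vizitat = [[False] * m for _ in range(n)]
--
--     # Direcții pentru deplasare (sus, jos, stânga, dreapta)
--     directii = [(-1, 0), (1, 0), (0, -1), (0, 1)]
--
--     # BFS pentru a marca toți zero-ii conectați de margine
--     def bfs(x, y):
--         coada = deque([(x, y)])
--         vizitat[x][y] = True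
--
--         while coada:
--             cx, cy = coada.popleft()
--             for dx, dy in directii:
--                 nx, ny = cx + dx, cy + dy
--                 if 0 <= nx < n and 0 <= ny < m and not vizitat[nx][ny] and matrice[nx][ny] == 0:
--                     vizitat[nx][ny] = True
--                     coada.append((nx, ny))
--
--     # Marcare zero-urilor de pe margine și a celor conectate cu ele
--     for i in range(n):
--         if matrice[i][0] == 0:
--             bfs(i, 0)
--         if matrice[i][m - 1] == 0:
--             bfs(i, m - 1)
--
--     for j in range(m):
--         if matrice[0][j] == 0:
--             bfs(0, j)
--         if matrice[n - 1][j] == 0: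
--             bfs(n - 1, j)
--
--     # Înlocuim toate zero-urile neatinse (care sunt complet înconjurate)
--     for i in range(n):
--         for j in range(m):
--             if matrice[i][j] == 0 and not vizitat[i][j]:
--                 matrice[i][j] = 1
--
--     return matrice
-- ===== SOURCE B (Python) =====
-- def f(matrice, n, m):
--     # Return-value-equivalent rewrite: fixpoint sweeps instead of BFS; mutates matrice in place like A.
--     if not matrice:
--         return []
--     n, m = len(matrice), len(matrice[0])
--
--     # Seed: every zero on the outer edge is border-connected.
--     marked = set()
--     for i in range(n):
--         for j in range(m):
--             if matrice[i][j] == 0 and (i == 0 or i == n - 1 or j == 0 or j == m - 1):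
--                 marked.add((i, j))
--
--     # Saturate: repeatedly sweep the grid, marking zeros adjacent to a marked cell.
--     changed = True
--     while changed:
--         changed = False
--         for i in range(n):
--             for j in range(m):
--                 if matrice[i][j] == 0 and (i, j) not in marked:
--                     if (i > 0 and (i - 1, j) in marked) or (i + 1, j) in marked \
--                        or (j > 0 and (i, j - 1) in marked) or (i, j + 1) in marked:
--                         marked.add((i, j))
--                         changed = True
--
--     # Flip every zero that never got marked.
--     for i in range(n):
--         for j in range(m):
--             if matrice[i][j] == 0 and (i, j) not in marked:
--                 matrice[i][j] = 1
--     return matrice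
-- ===== Notes on version B (the rewrite author's own statement) =====
-- stated objective: alternative
-- what changed: Replaces A's queue-based BFS flood fill from each border zero by a seed-then-saturate fixpoint: one pass collects all border zeros into a set, then whole-grid sweeps repeatedly mark zeros 4-adjacent to marked cells until a sweep changes nothing; the same final loop flips unmarked zeros in place.
import Mathlib
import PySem

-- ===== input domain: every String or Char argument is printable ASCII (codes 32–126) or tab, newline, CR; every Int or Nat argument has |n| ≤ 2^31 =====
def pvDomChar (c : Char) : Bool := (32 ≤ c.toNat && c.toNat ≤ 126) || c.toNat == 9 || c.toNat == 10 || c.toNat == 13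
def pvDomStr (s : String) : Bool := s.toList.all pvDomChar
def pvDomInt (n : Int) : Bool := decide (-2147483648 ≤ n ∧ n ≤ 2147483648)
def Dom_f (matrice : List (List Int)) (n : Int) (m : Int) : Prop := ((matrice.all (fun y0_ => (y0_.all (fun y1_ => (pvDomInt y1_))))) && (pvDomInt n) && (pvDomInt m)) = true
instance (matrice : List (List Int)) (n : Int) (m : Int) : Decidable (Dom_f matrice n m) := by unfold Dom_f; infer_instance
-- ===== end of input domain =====

-- B replaces A's queue-based BFS from the border by whole-grid fixpoint sweeps that saturate the
-- set of border-connected zeros; same return value and the same in-place flip of matrice.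

-- ===== PORT A =====
-- shared cell reads/writes (all Python indexing here is in range on Pre_f inputs; default values are never observed there)
def pvGetM (mat : List (List Int)) (i j : Nat) : Int := (mat.getD i []).getD j 1
def pvGet2 (g : List (List Bool)) (i j : Nat) : Bool := (g.getD i []).getD j false
def pvSet2 (g : List (List Bool)) (i j : Nat) : List (List Bool) := g.set i ((g.getD i []).set j true)

-- one direction of A's inner `for dx, dy in directii` loop
def pvTry (mat : List (List Int)) (nn mm : Nat) (cx cy : Nat) (dx dy : Int)
    (st : List (List Bool) × List (Nat × Nat)) : List (List Bool) × List (Nat × Nat) :=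
  if 0 ≤ (cx : Int) + dx ∧ (cx : Int) + dx < (nn : Int) ∧ 0 ≤ (cy : Int) + dy ∧ (cy : Int) + dy < (mm : Int) ∧
     pvGet2 st.1 ((cx : Int) + dx).toNat ((cy : Int) + dy).toNat = false ∧
     pvGetM mat ((cx : Int) + dx).toNat ((cy : Int) + dy).toNat = 0
  then (pvSet2 st.1 ((cx : Int) + dx).toNat ((cy : Int) + dy).toNat,
        st.2 ++ [(((cx : Int) + dx).toNat, ((cy : Int) + dy).toNat)])
  else st

-- the body of one iteration of A's `while coada:` loop: the popped cell's `for dx, dy in directii`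
def pvPop (mat : List (List Int)) (nn mm cx cy : Nat) (viz : List (List Bool))
    (rest : List (Nat × Nat)) : List (List Bool) × List (Nat × Nat) :=
  pvTry mat nn mm cx cy 0 1 (pvTry mat nn mm cx cy 0 (-1)
    (pvTry mat nn mm cx cy 1 0 (pvTry mat nn mm cx cy (-1) 0 (viz, rest))))

-- A's `while coada:` loop (fuel only makes it total; it is never exhausted on Pre_f inputs)
def pvBfsLoop (mat : List (List Int)) (nn mm : Nat) :
    Nat → List (List Bool) → List (Nat × Nat) → List (List Bool)
  | 0, viz, _ => viz
  | fuel + 1, viz, q =>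
    match q with
    | [] => viz
    | (cx, cy) :: rest =>
      let st := pvPop mat nn mm cx cy viz rest
      pvBfsLoop mat nn mm fuel st.1 st.2

def pvBfs (mat : List (List Int)) (nn mm : Nat) (viz : List (List Bool)) (x y : Nat) :
    List (List Bool) :=
  pvBfsLoop mat nn mm (4 * nn * mm + 2) (pvSet2 viz x y) [(x, y)]

-- A's two seeding loops over the border
def pvRowBody (mat : List (List Int)) (nn mm : Nat) (viz : List (List Bool)) (i : Nat) :
    List (List Bool) :=
  if pvGetM mat i (mm - 1) = 0
  then pvBfs mat nn mm (if pvGetM mat i 0 = 0 then pvBfs mat nn mm viz i 0 else viz) i (mm - 1)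
  else if pvGetM mat i 0 = 0 then pvBfs mat nn mm viz i 0 else viz

def pvRowSeed (mat : List (List Int)) (nn mm : Nat) (viz : List (List Bool)) : List (List Bool) :=
  (List.range nn).foldl (pvRowBody mat nn mm) viz

def pvColBody (mat : List (List Int)) (nn mm : Nat) (viz : List (List Bool)) (j : Nat) :
    List (List Bool) :=
  if pvGetM mat (nn - 1) j = 0
  then pvBfs mat nn mm (if pvGetM mat 0 j = 0 then pvBfs mat nn mm viz 0 j else viz) (nn - 1) j
  else if pvGetM mat 0 j = 0 then pvBfs mat nn mm viz 0 j else viz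

def pvColSeed (mat : List (List Int)) (nn mm : Nat) (viz : List (List Bool)) : List (List Bool) :=
  (List.range mm).foldl (pvColBody mat nn mm) viz

-- the final flip loop, textually identical in A and B (`solid` is A's `vizitat[i][j]` / B's `(i,j) in marked`)
def pvFlip (nn mm : Nat) (solid : Nat → Nat → Bool) (mat0 : List (List Int)) : List (List Int) :=
  (List.range nn).foldl (fun mat i =>
    (List.range mm).foldl (fun mat j =>
      if pvGetM mat i j = 0 ∧ solid i j = false
      then mat.set i ((mat.getD i []).set j 1) else mat) mat) mat0

def f (matrice : List (List Int)) (n : Int) (m : Int) : List (List Int) :=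
  if matrice = [] then []
  else
    let nn := matrice.length
    let mm := (matrice.headD []).length
    let viz0 : List (List Bool) := List.replicate nn (List.replicate mm false)
    let viz2 := pvColSeed matrice nn mm (pvRowSeed matrice nn mm viz0)
    pvFlip nn mm (fun i j => pvGet2 viz2 i j) matrice

-- ===== PORT B =====
-- B's border seeding pass
def pvSeedSet (mat : List (List Int)) (nn mm : Nat) : PySem.Set (Nat × Nat) :=
  (List.range nn).foldl (fun s i =>
    (List.range mm).foldl (fun s j =>
      if pvGetM mat i j = 0 ∧ (i = 0 ∨ i = nn - 1 ∨ j = 0 ∨ j = mm - 1)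
      then PySem.Set.add s (i, j) else s) s) PySem.Set.empty

-- `(i-1,j) in marked or (i+1,j) in marked or ...` (with B's explicit i>0 / j>0 guards)
abbrev pvNbr (s : PySem.Set (Nat × Nat)) (i j : Nat) : Prop :=
  (0 < i ∧ (i - 1, j) ∈ s) ∨ (i + 1, j) ∈ s ∨ (0 < j ∧ (i, j - 1) ∈ s) ∨ (i, j + 1) ∈ s

-- body of B's sweep for one cell
def pvCell (mat : List (List Int)) (i j : Nat) (st : PySem.Set (Nat × Nat) × Bool) :
    PySem.Set (Nat × Nat) × Bool :=
  if pvGetM mat i j = 0 ∧ (i, j) ∉ st.1 ∧ pvNbr st.1 i j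
  then (PySem.Set.add st.1 (i, j), true) else st

-- one full `for i / for j` sweep, starting with changed = False
def pvSweep (mat : List (List Int)) (nn mm : Nat) (s : PySem.Set (Nat × Nat)) :
    PySem.Set (Nat × Nat) × Bool :=
  (List.range nn).foldl (fun st i =>
    (List.range mm).foldl (fun st j => pvCell mat i j st) st) (s, false)

-- B's `while changed:` loop (fuel only makes it total; nn*mm+1 sweeps always reach the fixpoint)
def pvSweepLoop (mat : List (List Int)) (nn mm : Nat) :
    Nat → PySem.Set (Nat × Nat) → PySem.Set (Nat × Nat)
  | 0, s => s
  | fuel + 1, s =>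
    let st := pvSweep mat nn mm s
    if st.2 then pvSweepLoop mat nn mm fuel st.1 else st.1

def f_alt (matrice : List (List Int)) (n : Int) (m : Int) : List (List Int) :=
  if matrice = [] then []
  else
    let nn := matrice.length
    let mm := (matrice.headD []).length
    let s := pvSweepLoop matrice nn mm (nn * mm + 1) (pvSeedSet matrice nn mm)
    pvFlip nn mm (fun i j => decide ((i, j) ∈ s)) matrice

-- ===== PRECONDITION & SPEC =====
-- Pre_f excludes exactly the inputs where Python A raises IndexError: a nonempty matrix whose
-- first row is empty, or containing a row shorter than the first row (border accesses go out of range).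
def Pre_f (matrice : List (List Int)) (n : Int) (m : Int) : Prop :=
  matrice = [] ∨ (1 ≤ (matrice.headD []).length ∧
    ∀ r ∈ matrice, (matrice.headD []).length ≤ r.length)
instance (matrice : List (List Int)) (n : Int) (m : Int) : Decidable (Pre_f matrice n m) := by
  unfold Pre_f; infer_instance

def pvWitness_f : List (List Int) × Int × Int := ([[0, 1, 0], [1, 0, 1], [0, 1, 0]], 3, 3)

def Spec_f (matrice : List (List Int)) (n : Int) (m : Int) (out : List (List Int)) : Prop := out = f_alt matrice n m
instance (matrice : List (List Int)) (n : Int) (m : Int) (out : List (List Int)) : Decidable (Spec_f matrice n m out) := by unfold Spec_f; infer_instance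

-- ===== CLAIM (what is proved, stated in full; the proofs are below) =====
def Claim_equal_f : Prop := ∀ (matrice : List (List Int)) (n : Int) (m : Int), Dom_f matrice n m → Pre_f matrice n m → Spec_f matrice n m (f matrice n m)

-- ===== LEMMAS AND PROOFS =====

-- 4-adjacency of grid cells
def AdjP (a b i j : Nat) : Prop :=
  (a = i ∧ (b = j + 1 ∨ j = b + 1)) ∨ (b = j ∧ (a = i + 1 ∨ i = a + 1))

-- the set of zeros connected to the border (the common specification of both markings)
inductive Reach (mat : List (List Int)) (nn mm : Nat) : Nat → Nat → Prop
  | seed (i j : Nat) : i < nn → j < mm → (i = 0 ∨ i = nn - 1 ∨ j = 0 ∨ j = mm - 1) →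
      pvGetM mat i j = 0 → Reach mat nn mm i j
  | step (i j a b : Nat) : Reach mat nn mm i j → a < nn → b < mm → pvGetM mat a b = 0 →
      AdjP a b i j → Reach mat nn mm a b

def Shape (nn mm : Nat) (g : List (List Bool)) : Prop :=
  g.length = nn ∧ ∀ r ∈ g, r.length = mm

def fc (g : List (List Bool)) : Nat := (g.map (fun r => r.count false)).sum

def ClosedAt (mat : List (List Int)) (nn mm : Nat) (g : List (List Bool)) (i j : Nat) : Prop :=
  ∀ a b, a < nn → b < mm → pvGetM mat a b = 0 → AdjP a b i j → pvGet2 g a b = true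

def Closed (mat : List (List Int)) (nn mm : Nat) (g : List (List Bool)) : Prop :=
  ∀ i j, pvGet2 g i j = true → ClosedAt mat nn mm g i j

def Sound (mat : List (List Int)) (nn mm : Nat) (g : List (List Bool)) : Prop :=
  ∀ i j, pvGet2 g i j = true → Reach mat nn mm i j

-- basic facts about pvGet2 / pvSet2 / fc / Shape

theorem pv_getD_set_ne {α : Type} {l : List α} {x i : Nat} {a d : α} (h : i ≠ x) :
    (l.set x a).getD i d = l.getD i d := by
  simp [List.getD_eq_getElem?_getD, List.getElem?_set_ne (Ne.symm h)]

theorem pv_getD_set_self {α : Type} {l : List α} {x : Nat} {a d : α} (h : x < l.length) :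
    (l.set x a).getD x d = a := by
  simp [List.getD_eq_getElem?_getD, List.getElem?_set_self h]


theorem pv_getD_mem {α : Type} {l : List α} {i : Nat} {d : α} (hi : i < l.length) :
    l.getD i d ∈ l := by
  have h : l.getD i d = l[i] := by
    rw [List.getD_eq_getElem?_getD, List.getElem?_eq_getElem hi]; rfl
  rw [h]; exact List.getElem_mem hi

theorem pv_set2_oob {g : List (List Bool)} {i : Nat} (h : g.length ≤ i) (j : Nat) :
    pvSet2 g i j = g := List.set_eq_of_length_le h

theorem pv_get2_true_bounds {g : List (List Bool)} {i j : Nat} (h : pvGet2 g i j = true) :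
    i < g.length ∧ j < (g.getD i []).length := by
  unfold pvGet2 at h
  constructor
  · by_contra hc
    have hg : g.getD i [] = [] := List.getD_eq_default _ _ (by omega)
    rw [hg] at h
    simp at h
  · by_contra hc
    have hg : (g.getD i []).getD j false = false := List.getD_eq_default _ _ (by omega)
    rw [hg] at h
    simp at h

theorem pv_g2s_ne {g : List (List Bool)} {x y i j : Nat} (h : (i, j) ≠ (x, y)) :
    pvGet2 (pvSet2 g x y) i j = pvGet2 g i j := by
  unfold pvGet2 pvSet2
  by_cases hi : i = x
  · subst hi
    have hj : j ≠ y := fun hj => h (by rw [hj])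
    by_cases hx : i < g.length
    · rw [pv_getD_set_self hx, pv_getD_set_ne hj]
    · rw [List.set_eq_of_length_le (by omega)]
  · rw [pv_getD_set_ne hi]

theorem pv_g2s_self {g : List (List Bool)} {i j : Nat}
    (hi : i < g.length) (hj : j < (g.getD i []).length) :
    pvGet2 (pvSet2 g i j) i j = true := by
  unfold pvGet2 pvSet2
  rw [pv_getD_set_self hi, pv_getD_set_self hj]

theorem pv_g2s_mono {g : List (List Bool)} {x y i j : Nat}
    (h : pvGet2 g i j = true) : pvGet2 (pvSet2 g x y) i j = true := by
  by_cases hxy : (i, j) = (x, y)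
  · obtain ⟨hi, hj⟩ := pv_get2_true_bounds h
    obtain ⟨hx, hy⟩ := Prod.mk.injEq i j x y ▸ hxy
    subst hx; subst hy
    exact pv_g2s_self hi hj
  · rw [pv_g2s_ne hxy]; exact h

theorem pv_shape_set2 {nn mm : Nat} {g : List (List Bool)} (hs : Shape nn mm g) (i j : Nat) :
    Shape nn mm (pvSet2 g i j) := by
  obtain ⟨hlen, hrow⟩ := hs
  by_cases hi : i < g.length
  · constructor
    · simpa [pvSet2] using hlen
    · intro r hr
      unfold pvSet2 at hr
      rcases List.mem_or_eq_of_mem_set hr with h | h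
      · exact hrow r h
      · subst h
        rw [List.length_set]
        exact hrow _ (pv_getD_mem hi)
  · rw [pv_set2_oob (by omega)]; exact ⟨hlen, hrow⟩

theorem pv_count_set {l : List Bool} {j : Nat} (hj : j < l.length)
    (h : l.getD j false = false) : (l.set j true).count false + 1 = l.count false := by
  induction l generalizing j with
  | nil => simp at hj
  | cons a t ih =>
    cases j with
    | zero => simp_all
    | succ j =>
      simp only [List.set_cons_succ, List.count_cons]
      have := ih (by simpa using hj) (by simpa using h)
      omega

theorem pv_fc_set2 {g : List (List Bool)} {i j : Nat} (hi : i < g.length)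
    (hj : j < (g.getD i []).length) (h : pvGet2 g i j = false) :
    fc (pvSet2 g i j) + 1 = fc g := by
  induction g generalizing i with
  | nil => simp at hi
  | cons r t ih =>
    cases i with
    | zero =>
      simp only [List.getD_cons_zero] at hj h ⊢
      unfold pvSet2 fc
      simp only [List.getD_cons_zero, List.set_cons_zero, List.map_cons, List.sum_cons]
      have := pv_count_set hj (by simpa [pvGet2] using h)
      omega
    | succ i =>
      have hh : pvGet2 t i j = false := by simpa [pvGet2] using h
      have := ih (by simpa using hi) (by simpa using hj) hh
      unfold pvSet2 fc at *
      simp only [List.set_cons_succ, List.map_cons, List.sum_cons, List.getD_cons_succ] at *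
      omega

theorem pv_fc_le {mm : Nat} {g : List (List Bool)} (hrow : ∀ r ∈ g, r.length = mm) :
    fc g ≤ g.length * mm := by
  induction g with
  | nil => simp [fc]
  | cons r t ih =>
    have h1 : r.count false ≤ mm := by
      rw [← hrow r (List.mem_cons_self)]; exact List.count_le_length
    have h2 := ih (fun r hr => hrow r (List.mem_cons_of_mem _ hr))
    unfold fc at *
    simp only [List.map_cons, List.sum_cons, List.length_cons]
    calc r.count false + (t.map (fun r => r.count false)).sum ≤ mm + t.length * mm := by omega
    _ = (t.length + 1) * mm := by ring

-- ===== A side: the BFS marking =====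

def StepRel (mat : List (List Int)) (nn mm cx cy : Nat)
    (st st' : List (List Bool) × List (Nat × Nat)) : Prop :=
  st' = st ∨ ∃ a b : Nat, a < nn ∧ b < mm ∧ pvGetM mat a b = 0 ∧ pvGet2 st.1 a b = false ∧
    AdjP a b cx cy ∧ st' = (pvSet2 st.1 a b, st.2 ++ [(a, b)])

def JInv (mat : List (List Int)) (nn mm cx cy : Nat)
    (st : List (List Bool) × List (Nat × Nat)) : Prop :=
  Shape nn mm st.1 ∧ (∀ p ∈ st.2, pvGet2 st.1 p.1 p.2 = true) ∧ Sound mat nn mm st.1 ∧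
  (∀ i j, pvGet2 st.1 i j = true →
    (i, j) ∈ st.2 ∨ (i, j) = (cx, cy) ∨ ClosedAt mat nn mm st.1 i j)

def InvA (mat : List (List Int)) (nn mm : Nat) (viz : List (List Bool))
    (q : List (Nat × Nat)) : Prop :=
  Shape nn mm viz ∧ (∀ p ∈ q, pvGet2 viz p.1 p.2 = true) ∧ Sound mat nn mm viz ∧
  (∀ i j, pvGet2 viz i j = true → (i, j) ∈ q ∨ ClosedAt mat nn mm viz i j)

theorem pv_try_step {mat : List (List Int)} {nn mm cx cy : Nat} {dx dy : Int}
    (hd : (dx = -1 ∧ dy = 0) ∨ (dx = 1 ∧ dy = 0) ∨ (dx = 0 ∧ dy = -1) ∨ (dx = 0 ∧ dy = 1))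
    (st : List (List Bool) × List (Nat × Nat)) :
    StepRel mat nn mm cx cy st (pvTry mat nn mm cx cy dx dy st) := by
  unfold pvTry
  split_ifs with h
  · right
    obtain ⟨h1, h2, h3, h4, h5, h6⟩ := h
    refine ⟨((cx : Int) + dx).toNat, ((cy : Int) + dy).toNat, by omega, by omega, h6, h5, ?_, rfl⟩
    have ha : (((cx : Int) + dx).toNat : Int) = (cx : Int) + dx := Int.toNat_of_nonneg h1
    have hb : (((cy : Int) + dy).toNat : Int) = (cy : Int) + dy := Int.toNat_of_nonneg h3
    unfold AdjP
    rcases hd with ⟨e1, e2⟩ | ⟨e1, e2⟩ | ⟨e1, e2⟩ | ⟨e1, e2⟩ <;> subst e1 <;> subst e2 <;> omega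
  · left; rfl

theorem pv_try_covers {mat : List (List Int)} {nn mm cx cy : Nat} {dx dy : Int}
    {st : List (List Bool) × List (Nat × Nat)} (hs : Shape nn mm st.1)
    {a b : Nat} (ha : a < nn) (hb : b < mm) (hz : pvGetM mat a b = 0)
    (hxa : (a : Int) = (cx : Int) + dx) (hyb : (b : Int) = (cy : Int) + dy) :
    pvGet2 (pvTry mat nn mm cx cy dx dy st).1 a b = true := by
  have hta : ((cx : Int) + dx).toNat = a := by omega
  have htb : ((cy : Int) + dy).toNat = b := by omega
  unfold pvTry
  split_ifs with h
  · rw [hta, htb]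
    exact pv_g2s_self (by rw [hs.1]; exact ha)
      (by rw [hs.2 _ (pv_getD_mem (by rw [hs.1]; exact ha))]; exact hb)
  · simp only [hta, htb, not_and_or] at h
    rcases h with h | h | h | h | h | h
    · omega
    · omega
    · omega
    · omega
    · simpa using h
    · exact absurd hz h

theorem pv_step_all {mat : List (List Int)} {nn mm cx cy : Nat}
    {st st' : List (List Bool) × List (Nat × Nat)} (hreach : Reach mat nn mm cx cy)
    (hstep : StepRel mat nn mm cx cy st st') (hJ : JInv mat nn mm cx cy st) :
    JInv mat nn mm cx cy st' ∧ (∀ i j, pvGet2 st.1 i j = true → pvGet2 st'.1 i j = true) ∧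
    (∀ p ∈ st.2, p ∈ st'.2) ∧ (4 * fc st'.1 + st'.2.length ≤ 4 * fc st.1 + st.2.length) := by
  obtain ⟨hsh, hq, hsound, hfour⟩ := hJ
  rcases hstep with h | ⟨a, b, ha, hb, hz, hfalse, hadj, h⟩
  · subst h; exact ⟨⟨hsh, hq, hsound, hfour⟩, fun i j h => h, fun p hp => hp, le_refl _⟩
  · subst h
    have hab1 : a < st.1.length := by rw [hsh.1]; exact ha
    have hab2 : b < (st.1.getD a []).length := by
      rw [hsh.2 _ (pv_getD_mem hab1)]; exact hb
    have hmono : ∀ i j, pvGet2 st.1 i j = true → pvGet2 (pvSet2 st.1 a b) i j = true :=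
      fun i j h => pv_g2s_mono h
    refine ⟨⟨pv_shape_set2 hsh a b, ?_, ?_, ?_⟩, hmono, fun p hp => List.mem_append_left _ hp, ?_⟩
    · intro p hp
      rcases List.mem_append.mp hp with hp | hp
      · exact hmono _ _ (hq p hp)
      · simp at hp
        subst hp
        exact pv_g2s_self hab1 hab2
    · intro i j hij
      by_cases hcase : (i, j) = (a, b)
      · obtain ⟨h1, h2⟩ := Prod.mk.injEq i j a b ▸ hcase
        subst h1; subst h2
        exact Reach.step cx cy i j hreach ha hb hz hadj
      · rw [pv_g2s_ne hcase] at hij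
        exact hsound i j hij
    · intro i j hij
      by_cases hcase : (i, j) = (a, b)
      · left; rw [hcase]; exact List.mem_append_right _ (by simp)
      · rw [pv_g2s_ne hcase] at hij
        rcases hfour i j hij with h | h | h
        · left; exact List.mem_append_left _ h
        · right; left; exact h
        · right; right
          intro a' b' ha' hb' hz' hadj'
          exact hmono _ _ (h a' b' ha' hb' hz' hadj')
    · have := pv_fc_set2 hab1 hab2 hfalse
      simp only [List.length_append, List.length_cons, List.length_nil]
      omega

theorem pv_pop_good {mat : List (List Int)} {nn mm cx cy : Nat} {viz : List (List Bool)}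
    {rest : List (Nat × Nat)} (hinv : InvA mat nn mm viz ((cx, cy) :: rest)) :
    InvA mat nn mm (pvPop mat nn mm cx cy viz rest).1 (pvPop mat nn mm cx cy viz rest).2 ∧
    (∀ i j, pvGet2 viz i j = true → pvGet2 (pvPop mat nn mm cx cy viz rest).1 i j = true) ∧
    (4 * fc (pvPop mat nn mm cx cy viz rest).1 + (pvPop mat nn mm cx cy viz rest).2.length ≤
      4 * fc viz + rest.length) := by
  obtain ⟨hsh, hq, hsound, hfour⟩ := hinv
  have hcxy : pvGet2 viz cx cy = true := hq (cx, cy) (by simp)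
  have hreach : Reach mat nn mm cx cy := hsound cx cy hcxy
  have hJ0 : JInv mat nn mm cx cy (viz, rest) := by
    refine ⟨hsh, fun p hp => hq p (List.mem_cons_of_mem _ hp), hsound, ?_⟩
    intro i j hij
    rcases hfour i j hij with h | h
    · rcases List.mem_cons.mp h with h | h
      · right; left; exact h
      · left; exact h
    · right; right; exact h
  have t1 := pv_step_all hreach (pv_try_step (dx := -1) (dy := 0) (by norm_num) (viz, rest)) hJ0
  have t2 := pv_step_all hreach (pv_try_step (dx := 1) (dy := 0) (by norm_num)
    (pvTry mat nn mm cx cy (-1) 0 (viz, rest))) t1.1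
  have t3 := pv_step_all hreach (pv_try_step (dx := 0) (dy := -1) (by norm_num)
    (pvTry mat nn mm cx cy 1 0 (pvTry mat nn mm cx cy (-1) 0 (viz, rest)))) t2.1
  have t4 := pv_step_all hreach (pv_try_step (dx := 0) (dy := 1) (by norm_num)
    (pvTry mat nn mm cx cy 0 (-1) (pvTry mat nn mm cx cy 1 0
      (pvTry mat nn mm cx cy (-1) 0 (viz, rest))))) t3.1
  simp only [pvPop]
  obtain ⟨J4, mono4, pres4, meas4⟩ := t4
  obtain ⟨J3, mono3, pres3, meas3⟩ := t3
  obtain ⟨J2, mono2, pres2, meas2⟩ := t2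
  obtain ⟨J1, mono1, pres1, meas1⟩ := t1
  have monoAll : ∀ i j, pvGet2 viz i j = true →
      pvGet2 (pvTry mat nn mm cx cy 0 1 (pvTry mat nn mm cx cy 0 (-1)
        (pvTry mat nn mm cx cy 1 0 (pvTry mat nn mm cx cy (-1) 0 (viz, rest))))).1 i j = true :=
    fun i j h => mono4 i j (mono3 i j (mono2 i j (mono1 i j h)))
  have hclosed_cxy : ClosedAt mat nn mm (pvTry mat nn mm cx cy 0 1 (pvTry mat nn mm cx cy 0 (-1)
      (pvTry mat nn mm cx cy 1 0 (pvTry mat nn mm cx cy (-1) 0 (viz, rest))))).1 cx cy := by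
    intro a b ha hb hz hadj
    rcases hadj with ⟨h1, h2 | h2⟩ | ⟨h1, h2 | h2⟩
    · -- b = cy + 1 : direction (0, 1), covered by the outermost pvTry
      exact pv_try_covers J3.1 ha hb hz (by omega) (by omega)
    · -- cy = b + 1 : direction (0, -1)
      exact mono4 a b (pv_try_covers J2.1 ha hb hz (by omega) (by omega))
    · -- a = cx + 1 : direction (1, 0)
      exact mono4 a b (mono3 a b (pv_try_covers J1.1 ha hb hz (by omega) (by omega)))
    · -- cx = a + 1 : direction (-1, 0)
      exact mono4 a b (mono3 a b (mono2 a b (pv_try_covers hJ0.1 ha hb hz (by omega) (by omega))))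
  have e1 : fc (viz, rest).1 = fc viz := rfl
  have e2 : (viz, rest).2.length = rest.length := rfl
  refine ⟨⟨J4.1, J4.2.1, J4.2.2.1, ?_⟩, monoAll, by omega⟩
  intro i j hij
  rcases J4.2.2.2 i j hij with h | h | h
  · left; exact h
  · right
    obtain ⟨h1, h2⟩ := Prod.mk.injEq i j cx cy ▸ h
    subst h1; subst h2
    exact hclosed_cxy
  · right; exact h

theorem pv_bfsLoop_good {mat : List (List Int)} {nn mm : Nat} :
    ∀ (fuel : Nat) (viz : List (List Bool)) (q : List (Nat × Nat)),
    InvA mat nn mm viz q → 4 * fc viz + q.length < fuel →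
    Shape nn mm (pvBfsLoop mat nn mm fuel viz q) ∧
    (∀ i j, pvGet2 viz i j = true → pvGet2 (pvBfsLoop mat nn mm fuel viz q) i j = true) ∧
    Sound mat nn mm (pvBfsLoop mat nn mm fuel viz q) ∧
    Closed mat nn mm (pvBfsLoop mat nn mm fuel viz q) := by
  intro fuel
  induction fuel with
  | zero => intro viz q _ h; omega
  | succ fuel ih =>
    intro viz q hinv hfuel
    match q with
    | [] =>
      simp only [pvBfsLoop]
      exact ⟨hinv.1, fun i j h => h, hinv.2.2.1,
        fun i j h => (hinv.2.2.2 i j h).resolve_left (by simp)⟩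
    | (cx, cy) :: rest =>
      obtain ⟨hinv4, hmono, hmeas⟩ := pv_pop_good hinv
      have hrec := ih _ _ hinv4 (by simp at hfuel; omega)
      simp only [pvBfsLoop]
      exact ⟨hrec.1, fun i j h => hrec.2.1 i j (hmono i j h), hrec.2.2⟩

-- GVC g = Shape ∧ Sound ∧ Closed, the property carried through A's seeding loops
def GVC (mat : List (List Int)) (nn mm : Nat) (g : List (List Bool)) : Prop :=
  Shape nn mm g ∧ Sound mat nn mm g ∧ Closed mat nn mm g

theorem pv_bfs_good {mat : List (List Int)} {nn mm : Nat} {viz : List (List Bool)} {x y : Nat}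
    (hg : GVC mat nn mm viz) (hx : x < nn) (hy : y < mm)
    (hb : x = 0 ∨ x = nn - 1 ∨ y = 0 ∨ y = mm - 1) (hz : pvGetM mat x y = 0) :
    GVC mat nn mm (pvBfs mat nn mm viz x y) ∧
    (∀ i j, pvGet2 viz i j = true → pvGet2 (pvBfs mat nn mm viz x y) i j = true) ∧
    pvGet2 (pvBfs mat nn mm viz x y) x y = true := by
  obtain ⟨hsh, hsound, hcl⟩ := hg
  have hx1 : x < viz.length := by rw [hsh.1]; exact hx
  have hy1 : y < (viz.getD x []).length := by rw [hsh.2 _ (pv_getD_mem hx1)]; exact hy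
  have hself : pvGet2 (pvSet2 viz x y) x y = true := pv_g2s_self hx1 hy1
  have hinv : InvA mat nn mm (pvSet2 viz x y) [(x, y)] := by
    refine ⟨pv_shape_set2 hsh x y, ?_, ?_, ?_⟩
    · intro p hp; simp at hp; subst hp; exact hself
    · intro i j hij
      by_cases hcase : (i, j) = (x, y)
      · obtain ⟨h1, h2⟩ := Prod.mk.injEq i j x y ▸ hcase
        subst h1; subst h2
        exact Reach.seed i j hx hy hb hz
      · rw [pv_g2s_ne hcase] at hij
        exact hsound i j hij
    · intro i j hij
      by_cases hcase : (i, j) = (x, y)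
      · left; rw [hcase]; simp
      · rw [pv_g2s_ne hcase] at hij
        right
        intro a b ha hb' hz' hadj
        exact pv_g2s_mono (hcl i j hij a b ha hb' hz' hadj)
  have hfc : fc (pvSet2 viz x y) ≤ nn * mm := by
    have h1 := pv_fc_le (pv_shape_set2 hsh x y).2
    rw [(pv_shape_set2 hsh x y).1] at h1
    exact h1
  have hrun := pv_bfsLoop_good (4 * nn * mm + 2) (pvSet2 viz x y) [(x, y)] hinv
    (by simp only [List.length_cons, List.length_nil]
        have h4 := Nat.mul_le_mul_left 4 hfc
        have hassoc : 4 * nn * mm = 4 * (nn * mm) := by ring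
        omega)
  unfold pvBfs
  exact ⟨⟨hrun.1, hrun.2.2.1, hrun.2.2.2⟩,
    fun i j h => hrun.2.1 i j (pv_g2s_mono h),
    hrun.2.1 x y hself⟩

theorem pv_rowBody_good {mat : List (List Int)} {nn mm : Nat} {viz : List (List Bool)} {i : Nat}
    (hmm : 1 ≤ mm) (hg : GVC mat nn mm viz) (hi : i < nn) :
    GVC mat nn mm (pvRowBody mat nn mm viz i) ∧
    (∀ a b, pvGet2 viz a b = true → pvGet2 (pvRowBody mat nn mm viz i) a b = true) ∧
    (pvGetM mat i 0 = 0 → pvGet2 (pvRowBody mat nn mm viz i) i 0 = true) ∧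
    (pvGetM mat i (mm - 1) = 0 → pvGet2 (pvRowBody mat nn mm viz i) i (mm - 1) = true) := by
  unfold pvRowBody
  by_cases c1 : pvGetM mat i 0 = 0 <;> by_cases c2 : pvGetM mat i (mm - 1) = 0
  · rw [if_pos c2, if_pos c1]
    have t1 := pv_bfs_good hg hi (by omega) (by omega) c1
    have t2 := pv_bfs_good t1.1 hi (by omega) (by omega) c2
    exact ⟨t2.1, fun a b h => t2.2.1 a b (t1.2.1 a b h),
      fun _ => t2.2.1 i 0 t1.2.2, fun _ => t2.2.2⟩
  · rw [if_neg c2, if_pos c1]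
    have t1 := pv_bfs_good hg hi (by omega) (by omega) c1
    exact ⟨t1.1, t1.2.1, fun _ => t1.2.2, fun h => absurd h c2⟩
  · rw [if_pos c2, if_neg c1]
    have t2 := pv_bfs_good hg hi (by omega) (by omega) c2
    exact ⟨t2.1, t2.2.1, fun h => absurd h c1, fun _ => t2.2.2⟩
  · rw [if_neg c2, if_neg c1]
    exact ⟨hg, fun a b h => h, fun h => absurd h c1, fun h => absurd h c2⟩

theorem pv_colBody_good {mat : List (List Int)} {nn mm : Nat} {viz : List (List Bool)} {j : Nat}
    (hnn : 1 ≤ nn) (hg : GVC mat nn mm viz) (hj : j < mm) :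
    GVC mat nn mm (pvColBody mat nn mm viz j) ∧
    (∀ a b, pvGet2 viz a b = true → pvGet2 (pvColBody mat nn mm viz j) a b = true) ∧
    (pvGetM mat 0 j = 0 → pvGet2 (pvColBody mat nn mm viz j) 0 j = true) ∧
    (pvGetM mat (nn - 1) j = 0 → pvGet2 (pvColBody mat nn mm viz j) (nn - 1) j = true) := by
  unfold pvColBody
  by_cases c1 : pvGetM mat 0 j = 0 <;> by_cases c2 : pvGetM mat (nn - 1) j = 0
  · rw [if_pos c2, if_pos c1]
    have t1 := pv_bfs_good hg (by omega) hj (by omega) c1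
    have t2 := pv_bfs_good t1.1 (by omega) hj (by omega) c2
    exact ⟨t2.1, fun a b h => t2.2.1 a b (t1.2.1 a b h),
      fun _ => t2.2.1 0 j t1.2.2, fun _ => t2.2.2⟩
  · rw [if_neg c2, if_pos c1]
    have t1 := pv_bfs_good hg (by omega) hj (by omega) c1
    exact ⟨t1.1, t1.2.1, fun _ => t1.2.2, fun h => absurd h c2⟩
  · rw [if_pos c2, if_neg c1]
    have t2 := pv_bfs_good hg (by omega) hj (by omega) c2
    exact ⟨t2.1, t2.2.1, fun h => absurd h c1, fun _ => t2.2.2⟩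
  · rw [if_neg c2, if_neg c1]
    exact ⟨hg, fun a b h => h, fun h => absurd h c1, fun h => absurd h c2⟩

theorem pv_rowFold_good {mat : List (List Int)} {nn mm : Nat} (hmm : 1 ≤ mm) :
    ∀ (l : List Nat) (viz : List (List Bool)), (∀ i ∈ l, i < nn) → GVC mat nn mm viz →
    GVC mat nn mm (l.foldl (pvRowBody mat nn mm) viz) ∧
    (∀ a b, pvGet2 viz a b = true → pvGet2 (l.foldl (pvRowBody mat nn mm) viz) a b = true) ∧
    (∀ i ∈ l, (pvGetM mat i 0 = 0 → pvGet2 (l.foldl (pvRowBody mat nn mm) viz) i 0 = true) ∧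
      (pvGetM mat i (mm - 1) = 0 →
        pvGet2 (l.foldl (pvRowBody mat nn mm) viz) i (mm - 1) = true)) := by
  intro l
  induction l with
  | nil => intro viz _ hg; exact ⟨hg, fun a b h => h, by simp⟩
  | cons i t ih =>
    intro viz hl hg
    have hb := pv_rowBody_good hmm hg (hl i (by simp))
    have hrec := ih (pvRowBody mat nn mm viz i) (fun x hx => hl x (List.mem_cons_of_mem _ hx)) hb.1
    simp only [List.foldl_cons]
    refine ⟨hrec.1, fun a b h => hrec.2.1 a b (hb.2.1 a b h), ?_⟩
    intro x hx
    rcases List.mem_cons.mp hx with hx | hx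
    · subst hx
      exact ⟨fun h => hrec.2.1 x 0 (hb.2.2.1 h), fun h => hrec.2.1 x (mm - 1) (hb.2.2.2 h)⟩
    · exact hrec.2.2 x hx

theorem pv_colFold_good {mat : List (List Int)} {nn mm : Nat} (hnn : 1 ≤ nn) :
    ∀ (l : List Nat) (viz : List (List Bool)), (∀ j ∈ l, j < mm) → GVC mat nn mm viz →
    GVC mat nn mm (l.foldl (pvColBody mat nn mm) viz) ∧
    (∀ a b, pvGet2 viz a b = true → pvGet2 (l.foldl (pvColBody mat nn mm) viz) a b = true) ∧
    (∀ j ∈ l, (pvGetM mat 0 j = 0 → pvGet2 (l.foldl (pvColBody mat nn mm) viz) 0 j = true) ∧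
      (pvGetM mat (nn - 1) j = 0 →
        pvGet2 (l.foldl (pvColBody mat nn mm) viz) (nn - 1) j = true)) := by
  intro l
  induction l with
  | nil => intro viz _ hg; exact ⟨hg, fun a b h => h, by simp⟩
  | cons j t ih =>
    intro viz hl hg
    have hb := pv_colBody_good hnn hg (hl j (by simp))
    have hrec := ih (pvColBody mat nn mm viz j) (fun x hx => hl x (List.mem_cons_of_mem _ hx)) hb.1
    simp only [List.foldl_cons]
    refine ⟨hrec.1, fun a b h => hrec.2.1 a b (hb.2.1 a b h), ?_⟩
    intro x hx
    rcases List.mem_cons.mp hx with hx | hx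
    · subst hx
      exact ⟨fun h => hrec.2.1 0 x (hb.2.2.1 h), fun h => hrec.2.1 (nn - 1) x (hb.2.2.2 h)⟩
    · exact hrec.2.2 x hx

theorem pv_get2_replicate {nn mm i j : Nat} :
    pvGet2 (List.replicate nn (List.replicate mm (false : Bool))) i j = false := by
  unfold pvGet2
  simp [List.getD_eq_getElem?_getD, List.getElem?_replicate]
  split
  · simp [List.getElem?_replicate]
    split <;> simp
  · simp

-- the final visited grid of A marks exactly the border-connected zeros
theorem pv_A_char {mat : List (List Int)} {nn mm : Nat} (hnn : 1 ≤ nn) (hmm : 1 ≤ mm) :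
    ∀ i j, pvGet2 (pvColSeed mat nn mm (pvRowSeed mat nn mm
      (List.replicate nn (List.replicate mm false)))) i j = true ↔ Reach mat nn mm i j := by
  have hg0 : GVC mat nn mm (List.replicate nn (List.replicate mm false)) := by
    refine ⟨⟨by simp, ?_⟩, ?_, ?_⟩
    · intro r hr
      rw [List.eq_of_mem_replicate hr]; simp
    · intro i j h; rw [pv_get2_replicate] at h; simp at h
    · intro i j h; rw [pv_get2_replicate] at h; simp at h
  have hrow := pv_rowFold_good hmm (List.range nn)
    (List.replicate nn (List.replicate mm false)) (by simp) hg0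
  have hcol := pv_colFold_good hnn (List.range mm) _ (by simp) hrow.1
  unfold pvRowSeed pvColSeed
  intro i j
  constructor
  · exact fun h => hcol.1.2.1 i j h
  · intro h
    induction h with
    | seed a b ha hb hborder hz =>
      rcases hborder with hc | hc | hc | hc
      · subst hc; exact (hcol.2.2 b (by simp [hb])).1 hz
      · subst hc; exact (hcol.2.2 b (by simp [hb])).2 hz
      · subst hc; exact hcol.2.1 _ _ ((hrow.2.2 a (by simp [ha])).1 hz)
      · subst hc; exact hcol.2.1 _ _ ((hrow.2.2 a (by simp [ha])).2 hz)
    | step a b c d hr hc' hd hz hadj ih =>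
      exact hcol.1.2.2 a b ih c d hc' hd hz hadj

-- ===== B side: the sweep marking =====

def InvB (mat : List (List Int)) (nn mm : Nat) (s : List (Nat × Nat)) : Prop :=
  s.Nodup ∧ ∀ p ∈ s, p.1 < nn ∧ p.2 < mm ∧ pvGetM mat p.1 p.2 = 0 ∧ Reach mat nn mm p.1 p.2

theorem pv_add_of_not_mem {s : PySem.Set (Nat × Nat)} {x : Nat × Nat} (h : x ∉ s) :
    PySem.Set.add s x = s ++ [x] := by
  unfold PySem.Set.add
  rw [if_neg]
  intro hc
  exact h ((PySem.Set.contains_iff _ _).mp hc)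

theorem pv_cell_cases (mat : List (List Int)) (i j : Nat) (st : PySem.Set (Nat × Nat) × Bool) :
    pvCell mat i j st = st ∨
    (pvGetM mat i j = 0 ∧ (i, j) ∉ st.1 ∧ pvNbr st.1 i j ∧
      pvCell mat i j st = (st.1 ++ [(i, j)], true)) := by
  unfold pvCell
  split_ifs with h
  · right
    exact ⟨h.1, h.2.1, h.2.2, by rw [pv_add_of_not_mem h.2.1]⟩
  · left; rfl

theorem pv_cell_eq_guard {mat : List (List Int)} {i j : Nat} {st : PySem.Set (Nat × Nat) × Bool}
    (hc : pvCell mat i j st = st) :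
    ¬(pvGetM mat i j = 0 ∧ (i, j) ∉ st.1 ∧ pvNbr st.1 i j) := by
  intro habs
  have h2 : pvCell mat i j st = (st.1 ++ [(i, j)], true) := by
    unfold pvCell
    rw [if_pos habs, pv_add_of_not_mem habs.2.1]
  rw [hc] at h2
  have := congrArg (fun p => p.1.length) h2
  simp at this

-- all the inner-fold facts at once
theorem pv_innerFold_good {mat : List (List Int)} {nn mm : Nat} {i : Nat} :
    ∀ (l : List Nat) (st : PySem.Set (Nat × Nat) × Bool),
    (InvB mat nn mm st.1 → i < nn → (∀ j ∈ l, j < mm) →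
      InvB mat nn mm ((l.foldl (fun st j => pvCell mat i j st) st)).1) ∧
    st.1 <+: ((l.foldl (fun st j => pvCell mat i j st) st)).1 ∧
    (st.2 = true → ((l.foldl (fun st j => pvCell mat i j st) st)).2 = true) ∧
    (((l.foldl (fun st j => pvCell mat i j st) st)).2 = false →
      (l.foldl (fun st j => pvCell mat i j st) st) = st ∧
      ∀ j ∈ l, ¬(pvGetM mat i j = 0 ∧ (i, j) ∉ st.1 ∧ pvNbr st.1 i j)) ∧
    (((l.foldl (fun st j => pvCell mat i j st) st)).2 = true → st.2 = false →
      st.1.length < ((l.foldl (fun st j => pvCell mat i j st) st)).1.length) := by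
  intro l
  induction l with
  | nil =>
    intro st
    simp only [List.foldl_nil]
    exact ⟨fun h _ _ => h, List.prefix_refl _, fun h => h,
      fun _ => ⟨by trivial, fun j hj => by simp at hj⟩,
      fun h1 h2 => by simp [h2] at h1⟩
  | cons j t ih =>
    intro st
    simp only [List.foldl_cons]
    have hrec := ih (pvCell mat i j st)
    rcases pv_cell_cases mat i j st with hc | ⟨hz, hni, hnb, hc⟩
    · rw [hc] at hrec ⊢
      refine ⟨fun h1 h2 h3 => hrec.1 h1 h2 (fun x hx => h3 x (List.mem_cons_of_mem _ hx)),
        hrec.2.1, hrec.2.2.1, ?_, hrec.2.2.2.2⟩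
      intro hfalse
      obtain ⟨he, hall⟩ := hrec.2.2.2.1 hfalse
      refine ⟨he, ?_⟩
      intro x hx
      rcases List.mem_cons.mp hx with hx | hx
      · subst hx
        exact pv_cell_eq_guard hc
      · exact hall x hx
    · rw [hc] at hrec ⊢
      have hpref1 : st.1 <+: st.1 ++ [(i, j)] := ⟨[(i, j)], rfl⟩
      refine ⟨?_, hpref1.trans hrec.2.1, fun _ => hrec.2.2.1 rfl, ?_, ?_⟩
      · intro h1 h2 h3
        apply hrec.1 _ h2 (fun x hx => h3 x (List.mem_cons_of_mem _ hx))
        constructor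
        · exact h1.1.append (List.nodup_singleton _)
            (by intro a ha hax; simp at hax; subst hax; exact hni ha)
        · intro p hp
          rcases List.mem_append.mp hp with hp | hp
          · exact h1.2 p hp
          · simp at hp
            subst hp
            have hj : j < mm := h3 j (by simp)
            have hreach : Reach mat nn mm i j := by
              rcases hnb with ⟨hpos, hm⟩ | hm | ⟨hpos, hm⟩ | hm
              · obtain ⟨_, _, _, hr⟩ := h1.2 _ hm
                exact Reach.step (i - 1) j i j hr h2 hj hz (by unfold AdjP; omega)
              · obtain ⟨_, _, _, hr⟩ := h1.2 _ hm
                exact Reach.step (i + 1) j i j hr h2 hj hz (by unfold AdjP; omega)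
              · obtain ⟨_, _, _, hr⟩ := h1.2 _ hm
                exact Reach.step i (j - 1) i j hr h2 hj hz (by unfold AdjP; omega)
              · obtain ⟨_, _, _, hr⟩ := h1.2 _ hm
                exact Reach.step i (j + 1) i j hr h2 hj hz (by unfold AdjP; omega)
            exact ⟨h2, hj, hz, hreach⟩
      · intro hfalse
        have := hrec.2.2.1 rfl
        rw [hfalse] at this
        cases this
      · intro _ _
        calc st.1.length < (st.1 ++ [(i, j)]).length := by simp
        _ ≤ _ := hrec.2.1.length_le

theorem pv_outerFold_good {mat : List (List Int)} {nn mm : Nat} :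
    ∀ (l : List Nat) (st : PySem.Set (Nat × Nat) × Bool),
    (InvB mat nn mm st.1 → (∀ i ∈ l, i < nn) →
      InvB mat nn mm ((l.foldl (fun st i =>
        (List.range mm).foldl (fun st j => pvCell mat i j st) st) st)).1) ∧
    st.1 <+: ((l.foldl (fun st i =>
        (List.range mm).foldl (fun st j => pvCell mat i j st) st) st)).1 ∧
    (st.2 = true → ((l.foldl (fun st i =>
        (List.range mm).foldl (fun st j => pvCell mat i j st) st) st)).2 = true) ∧
    (((l.foldl (fun st i =>
        (List.range mm).foldl (fun st j => pvCell mat i j st) st) st)).2 = false →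
      (l.foldl (fun st i =>
        (List.range mm).foldl (fun st j => pvCell mat i j st) st) st) = st ∧
      ∀ i ∈ l, ∀ j ∈ List.range mm,
        ¬(pvGetM mat i j = 0 ∧ (i, j) ∉ st.1 ∧ pvNbr st.1 i j)) ∧
    (((l.foldl (fun st i =>
        (List.range mm).foldl (fun st j => pvCell mat i j st) st) st)).2 = true →
      st.2 = false →
      st.1.length < ((l.foldl (fun st i =>
        (List.range mm).foldl (fun st j => pvCell mat i j st) st) st)).1.length) := by
  intro l
  induction l with
  | nil =>
    intro st
    simp only [List.foldl_nil]
    exact ⟨fun h _ => h, List.prefix_refl _, fun h => h,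
      fun _ => ⟨by trivial, fun i hi => by simp at hi⟩,
      fun h1 h2 => by simp [h2] at h1⟩
  | cons i t ih =>
    intro st
    simp only [List.foldl_cons]
    have hin := pv_innerFold_good (mat := mat) (nn := nn) (mm := mm) (i := i) (List.range mm) st
    have hrec := ih ((List.range mm).foldl (fun st j => pvCell mat i j st) st)
    refine ⟨?_, hin.2.1.trans hrec.2.1, fun h => hrec.2.2.1 (hin.2.2.1 h), ?_, ?_⟩
    · intro h1 h2
      exact hrec.1 (hin.1 h1 (h2 i (by simp)) (fun j hj => by simpa using hj))
        (fun x hx => h2 x (List.mem_cons_of_mem _ hx))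
    · intro hfalse
      have hst1 : ((List.range mm).foldl (fun st j => pvCell mat i j st) st).2 = false := by
        by_contra hc
        rw [hrec.2.2.1 (by simpa using hc)] at hfalse
        cases hfalse
      obtain ⟨he1, hg1⟩ := hin.2.2.2.1 hst1
      rw [he1] at hrec hfalse ⊢
      obtain ⟨he2, hg2⟩ := hrec.2.2.2.1 hfalse
      refine ⟨he2, ?_⟩
      intro x hx
      rcases List.mem_cons.mp hx with hx | hx
      · subst hx; exact hg1
      · exact hg2 x hx
    · intro htrue hfalse
      rcases hf1 : ((List.range mm).foldl (fun st j => pvCell mat i j st) st).2 with _ | _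
      · obtain ⟨he1, _⟩ := hin.2.2.2.1 hf1
        rw [he1] at hrec htrue ⊢
        exact hrec.2.2.2.2 htrue hfalse
      · calc st.1.length < ((List.range mm).foldl (fun st j => pvCell mat i j st) st).1.length :=
          hin.2.2.2.2 hf1 hfalse
        _ ≤ _ := hrec.2.1.length_le

theorem pv_card_bound {nn mm : Nat} {s : List (Nat × Nat)} (hnd : s.Nodup)
    (hin : ∀ p ∈ s, p.1 < nn ∧ p.2 < mm) : s.length ≤ nn * mm := by
  have h1 : s.toFinset.card = s.length := List.toFinset_card_of_nodup hnd
  have h2 : s.toFinset ⊆ Finset.range nn ×ˢ Finset.range mm := by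
    intro p hp
    rw [Finset.mem_product, Finset.mem_range, Finset.mem_range]
    exact hin p (List.mem_toFinset.mp hp)
  have h3 := Finset.card_le_card h2
  rw [h1, Finset.card_product, Finset.card_range, Finset.card_range] at h3
  exact h3

theorem pv_sweepLoop_good {mat : List (List Int)} {nn mm : Nat} :
    ∀ (fuel : Nat) (s : PySem.Set (Nat × Nat)), InvB mat nn mm s → nn * mm < fuel + s.length →
    InvB mat nn mm (pvSweepLoop mat nn mm fuel s) ∧
    (∀ p ∈ s, p ∈ pvSweepLoop mat nn mm fuel s) ∧
    (∀ i j, i < nn → j < mm → pvGetM mat i j = 0 →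
      pvNbr (pvSweepLoop mat nn mm fuel s) i j → (i, j) ∈ pvSweepLoop mat nn mm fuel s) := by
  intro fuel
  induction fuel with
  | zero =>
    intro s hinv hb
    exfalso
    have := pv_card_bound hinv.1 (fun p hp => ⟨(hinv.2 p hp).1, (hinv.2 p hp).2.1⟩)
    omega
  | succ fuel ih =>
    intro s hinv hb
    have hout := pv_outerFold_good (mat := mat) (nn := nn) (mm := mm) (List.range nn) (s, false)
    rcases hf : (pvSweep mat nn mm s).2 with _ | _
    · -- fixpoint: the sweep changed nothing
      have hD := hout.2.2.2.1 (by unfold pvSweep at hf; exact hf)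
      simp only [pvSweepLoop, hf, if_false]
      have he : (pvSweep mat nn mm s).1 = s := by
        unfold pvSweep; rw [hD.1]
      rw [he]
      refine ⟨hinv, fun p hp => hp, ?_⟩
      intro i j hi hj hz hnb
      by_contra hni
      exact hD.2 i (by simp [hi]) j (by simp [hj]) ⟨hz, hni, hnb⟩
    · -- something was added: recurse with a strictly larger set
      have hinv1 : InvB mat nn mm (pvSweep mat nn mm s).1 := by
        unfold pvSweep; exact hout.1 hinv (by simp)
      have hlen : s.length < (pvSweep mat nn mm s).1.length := by
        unfold pvSweep at hf ⊢; exact hout.2.2.2.2 hf rfl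
      have hrec := ih (pvSweep mat nn mm s).1 hinv1 (by omega)
      simp only [pvSweepLoop, hf, if_true]
      refine ⟨hrec.1, ?_, hrec.2.2⟩
      intro p hp
      apply hrec.2.1
      have hpre : s <+: (pvSweep mat nn mm s).1 := by
        unfold pvSweep; exact hout.2.1
      exact hpre.subset hp

theorem pv_seedInner_good {mat : List (List Int)} {nn mm i : Nat} :
    ∀ (l : List Nat) (s : PySem.Set (Nat × Nat)),
    InvB mat nn mm s → i < nn → (∀ j ∈ l, j < mm) →
    InvB mat nn mm (l.foldl (fun s j =>
      if pvGetM mat i j = 0 ∧ (i = 0 ∨ i = nn - 1 ∨ j = 0 ∨ j = mm - 1)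
      then PySem.Set.add s (i, j) else s) s) ∧
    (∀ p ∈ s, p ∈ (l.foldl (fun s j =>
      if pvGetM mat i j = 0 ∧ (i = 0 ∨ i = nn - 1 ∨ j = 0 ∨ j = mm - 1)
      then PySem.Set.add s (i, j) else s) s)) ∧
    (∀ j ∈ l, pvGetM mat i j = 0 → (i = 0 ∨ i = nn - 1 ∨ j = 0 ∨ j = mm - 1) →
      (i, j) ∈ (l.foldl (fun s j =>
        if pvGetM mat i j = 0 ∧ (i = 0 ∨ i = nn - 1 ∨ j = 0 ∨ j = mm - 1)
        then PySem.Set.add s (i, j) else s) s)) := by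
  intro l
  induction l with
  | nil =>
    intro s hinv _ _
    exact ⟨hinv, fun p hp => hp, fun j hj => by simp at hj⟩
  | cons j t ih =>
    intro s hinv hi hl
    simp only [List.foldl_cons]
    have hstep : ∀ s', InvB mat nn mm s' →
        InvB mat nn mm (if pvGetM mat i j = 0 ∧ (i = 0 ∨ i = nn - 1 ∨ j = 0 ∨ j = mm - 1)
          then PySem.Set.add s' (i, j) else s') ∧
        (∀ p ∈ s', p ∈ (if pvGetM mat i j = 0 ∧ (i = 0 ∨ i = nn - 1 ∨ j = 0 ∨ j = mm - 1)
          then PySem.Set.add s' (i, j) else s')) := by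
      intro s' hinv'
      split_ifs with hcond
      · refine ⟨⟨PySem.Set.nodup_add _ _ hinv'.1, ?_⟩, fun p hp => (PySem.Set.mem_add _ _ _).mpr (Or.inl hp)⟩
        intro p hp
        rcases (PySem.Set.mem_add _ _ _).mp hp with hp | hp
        · exact hinv'.2 p hp
        · subst hp
          exact ⟨hi, hl j (by simp), hcond.1,
            Reach.seed i j hi (hl j (by simp)) hcond.2 hcond.1⟩
      · exact ⟨hinv', fun p hp => hp⟩
    have hs := hstep s hinv
    have hrec := ih _ hs.1 hi (fun x hx => hl x (List.mem_cons_of_mem _ hx))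
    refine ⟨hrec.1, fun p hp => hrec.2.1 p (hs.2 p hp), ?_⟩
    intro x hx hz hb
    rcases List.mem_cons.mp hx with hx | hx
    · subst hx
      apply hrec.2.1
      rw [if_pos ⟨hz, hb⟩]
      exact (PySem.Set.mem_add _ _ _).mpr (Or.inr rfl)
    · exact hrec.2.2 x hx hz hb

theorem pv_seed_good {mat : List (List Int)} {nn mm : Nat} :
    InvB mat nn mm (pvSeedSet mat nn mm) ∧
    ∀ i j, i < nn → j < mm → pvGetM mat i j = 0 → (i = 0 ∨ i = nn - 1 ∨ j = 0 ∨ j = mm - 1) →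
      (i, j) ∈ pvSeedSet mat nn mm := by
  unfold pvSeedSet
  suffices h : ∀ (l : List Nat) (s : PySem.Set (Nat × Nat)),
      InvB mat nn mm s → (∀ i ∈ l, i < nn) →
      InvB mat nn mm (l.foldl (fun s i => (List.range mm).foldl (fun s j =>
        if pvGetM mat i j = 0 ∧ (i = 0 ∨ i = nn - 1 ∨ j = 0 ∨ j = mm - 1)
        then PySem.Set.add s (i, j) else s) s) s) ∧
      (∀ p ∈ s, p ∈ (l.foldl (fun s i => (List.range mm).foldl (fun s j =>
        if pvGetM mat i j = 0 ∧ (i = 0 ∨ i = nn - 1 ∨ j = 0 ∨ j = mm - 1)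
        then PySem.Set.add s (i, j) else s) s) s)) ∧
      (∀ i ∈ l, ∀ j, j < mm → pvGetM mat i j = 0 → (i = 0 ∨ i = nn - 1 ∨ j = 0 ∨ j = mm - 1) →
        (i, j) ∈ (l.foldl (fun s i => (List.range mm).foldl (fun s j =>
          if pvGetM mat i j = 0 ∧ (i = 0 ∨ i = nn - 1 ∨ j = 0 ∨ j = mm - 1)
          then PySem.Set.add s (i, j) else s) s) s)) by
    have h0 := h (List.range nn) PySem.Set.empty
      ⟨List.nodup_nil, fun p hp => by simp [PySem.Set.empty] at hp⟩ (by simp)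
    exact ⟨h0.1, fun i j hi hj hz hb => h0.2.2 i (by simp [hi]) j hj hz hb⟩
  intro l
  induction l with
  | nil =>
    intro s hinv _
    exact ⟨hinv, fun p hp => hp, fun i hi => by simp at hi⟩
  | cons i t ih =>
    intro s hinv hl
    simp only [List.foldl_cons]
    have hin := pv_seedInner_good (List.range mm) s hinv (hl i (by simp))
      (fun j hj => by simpa using hj)
    have hrec := ih _ hin.1 (fun x hx => hl x (List.mem_cons_of_mem _ hx))
    refine ⟨hrec.1, fun p hp => hrec.2.1 p (hin.2.1 p hp), ?_⟩
    intro x hx j hj hz hb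
    rcases List.mem_cons.mp hx with hx | hx
    · subst hx
      exact hrec.2.1 _ (hin.2.2 j (by simp [hj]) hz hb)
    · exact hrec.2.2 x hx j hj hz hb

theorem pv_B_char {mat : List (List Int)} {nn mm : Nat} :
    ∀ i j, (i, j) ∈ pvSweepLoop mat nn mm (nn * mm + 1) (pvSeedSet mat nn mm) ↔
      Reach mat nn mm i j := by
  have hseed := pv_seed_good (mat := mat) (nn := nn) (mm := mm)
  have hloop := pv_sweepLoop_good (nn * mm + 1) (pvSeedSet mat nn mm) hseed.1 (by omega)
  intro i j
  constructor
  · intro h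
    exact (hloop.1.2 _ h).2.2.2
  · intro h
    induction h with
    | seed a b ha hb hborder hz => exact hloop.2.1 _ (hseed.2 a b ha hb hz hborder)
    | step a b c d hr hc hd hz hadj ih =>
      apply hloop.2.2 c d hc hd hz
      rcases hadj with ⟨h1, h2 | h2⟩ | ⟨h1, h2 | h2⟩
      · -- d = b + 1, parent (a, b) = (c, d - 1)
        refine Or.inr (Or.inr (Or.inl ⟨by omega, ?_⟩))
        have he : (c, d - 1) = (a, b) := by rw [Prod.mk.injEq]; omega
        rw [he]; exact ih
      · -- b = d + 1, parent (a, b) = (c, d + 1)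
        refine Or.inr (Or.inr (Or.inr ?_))
        have he : (c, d + 1) = (a, b) := by rw [Prod.mk.injEq]; omega
        rw [he]; exact ih
      · -- c = a + 1, parent (a, b) = (c - 1, d)
        refine Or.inl ⟨by omega, ?_⟩
        have he : (c - 1, d) = (a, b) := by rw [Prod.mk.injEq]; omega
        rw [he]; exact ih
      · -- a = c + 1, parent (a, b) = (c + 1, d)
        refine Or.inr (Or.inl ?_)
        have he : (c + 1, d) = (a, b) := by rw [Prod.mk.injEq]; omega
        rw [he]; exact ih

theorem pv_bool_eq_decide {b : Bool} {P : Prop} [Decidable P] (h : b = true ↔ P) :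
    b = decide P := by
  by_cases hp : P
  · simp [hp, h.mpr hp]
  · have hb : b = false := by
      cases hbb : b
      · rfl
      · exact absurd (h.mp hbb) hp
    simp [hb, hp]

theorem f_spec : Claim_equal_f := by
  unfold Claim_equal_f
  intro matrice n m _hdom hpre
  unfold Spec_f f f_alt
  by_cases hemp : matrice = []
  · rw [if_pos hemp, if_pos hemp]
  · rw [if_neg hemp, if_neg hemp]
    have hnn : 1 ≤ matrice.length := List.length_pos_of_ne_nil hemp
    have hmm : 1 ≤ (matrice.headD []).length := (hpre.resolve_left hemp).1
    have hsolid : (fun i j => pvGet2 (pvColSeed matrice matrice.length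
        (matrice.headD []).length (pvRowSeed matrice matrice.length (matrice.headD []).length
        (List.replicate matrice.length (List.replicate (matrice.headD []).length false)))) i j) =
        (fun i j => decide ((i, j) ∈ pvSweepLoop matrice matrice.length (matrice.headD []).length
        (matrice.length * (matrice.headD []).length + 1)
        (pvSeedSet matrice matrice.length (matrice.headD []).length))) := by
      funext i j
      exact pv_bool_eq_decide ((pv_A_char hnn hmm i j).trans (pv_B_char i j).symm)
    simp only [hsolid]
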